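-- pv_equiv track=rewrite | github.com/keremidarski/python_playground | Programming 0/week 4/09_winter.py | winter_is_coming
-- ===== SOURCE A (Python) =====
-- def winter_is_coming(seasons):
--     is_coming = False
--     counter = 0
--
--     for season in seasons:
--         if season != 'winter':
--             counter += 1
--         else:
--             counter = 0
--
--     if counter >= 5:
--         is_coming = True
--
--     return is_coming
-- ===== SOURCE B (Python) =====
-- def winter_is_coming(seasons):
--     counter = 0
--     for season in reversed(seasons):
--         if season == 'winter':
--             break
--         counter += 1
--     return counter >= 5
-- ===== Notes on version B (the rewrite author's own statement) =====
-- stated objective: simpler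
-- what changed: B scans from the end with an early break at the first 'winter', counting only the trailing non-winter run, instead of A's full forward pass with counter resets.
import Mathlib
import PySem

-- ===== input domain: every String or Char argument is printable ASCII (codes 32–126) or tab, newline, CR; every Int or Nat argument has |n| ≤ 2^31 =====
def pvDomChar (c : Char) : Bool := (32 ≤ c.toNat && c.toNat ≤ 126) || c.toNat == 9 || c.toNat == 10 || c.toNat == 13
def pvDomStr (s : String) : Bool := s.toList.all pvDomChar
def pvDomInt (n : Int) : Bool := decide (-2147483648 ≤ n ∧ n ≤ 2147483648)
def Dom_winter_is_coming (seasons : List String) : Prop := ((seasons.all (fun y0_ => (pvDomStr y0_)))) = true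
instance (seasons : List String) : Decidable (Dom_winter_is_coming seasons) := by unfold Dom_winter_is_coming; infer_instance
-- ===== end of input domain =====

-- B scans from the end with an early break at the first 'winter' (no reset logic); same result as A's forward pass.

-- ===== PORT A =====
-- the loop body: reset on 'winter', otherwise increment
def pvStepA (c : Int) (s : String) : Int := if s ≠ "winter" then c + 1 else 0

def winter_is_coming (seasons : List String) : Bool :=
  let counter := seasons.foldl pvStepA 0
  if counter ≥ 5 then true else false

-- ===== PORT B =====
-- count over reversed(seasons), breaking at the first 'winter'
def pvTrail : List String → Int
  | [] => 0
  | s :: t => if s = "winter" then 0 else pvTrail t + 1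

def winter_is_coming_alt (seasons : List String) : Bool :=
  pvTrail seasons.reverse ≥ 5

-- ===== PRECONDITION & SPEC =====
def Spec_winter_is_coming (seasons : List String) (out : Bool) : Prop := out = winter_is_coming_alt seasons
instance (seasons : List String) (out : Bool) : Decidable (Spec_winter_is_coming seasons out) := by unfold Spec_winter_is_coming; infer_instance

-- ===== CLAIM (what is proved, stated in full; the proofs are below) =====
def Claim_equal_winter_is_coming : Prop := ∀ (seasons : List String), Dom_winter_is_coming seasons → Spec_winter_is_coming seasons (winter_is_coming seasons)

-- ===== LEMMAS AND PROOFS =====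
theorem pvTrail_all_not (l : List String) (h : "winter" ∉ l) : pvTrail l = l.length := by
  induction l with
  | nil => rfl
  | cons s t ih =>
      simp only [List.mem_cons, not_or] at h
      simp [pvTrail, Ne.symm h.1, ih h.2]

theorem pvTrail_append_single (xs : List String) (s : String) :
    pvTrail (xs ++ [s]) =
      if "winter" ∈ xs then pvTrail xs
      else if s = "winter" then (xs.length : Int) else pvTrail xs + 1 := by
  induction xs with
  | nil => simp [pvTrail]
  | cons x t ih =>
      simp only [List.cons_append, pvTrail, ih, List.mem_cons]
      split_ifs with h1 h2 h3 h4 h5 <;>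
        simp_all [pvTrail_all_not, eq_comm]

theorem foldA_eq (l : List String) (c : Int) :
    l.foldl pvStepA c = pvTrail l.reverse + (if "winter" ∈ l then 0 else c) := by
  induction l generalizing c with
  | nil => simp [pvTrail]
  | cons s t ih =>
      simp only [List.foldl_cons, List.reverse_cons, ih, pvTrail_append_single, List.mem_cons]
      by_cases ht : "winter" ∈ t
      · simp [ht]
      · by_cases hs : s = "winter"
        · simp [ht, hs, pvStepA, pvTrail_all_not t.reverse (by simpa using ht)]
        · simp [ht, hs, Ne.symm hs, pvStepA]
          ring

-- ===== VERDICT (by name: the statement is the Claim_ definition above) =====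
theorem winter_is_coming_spec : Claim_equal_winter_is_coming := by
  intro seasons _
  unfold Spec_winter_is_coming winter_is_coming winter_is_coming_alt
  rw [foldA_eq]
  by_cases h : "winter" ∈ seasons <;> simp [h]
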